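-- pv_equiv track=rewrite | github.com/iwakura1ain/Financiar | FinancierBackend/FinancierBackend/FDRReader/cache.py | get_empty_date_ranges
-- ===== SOURCE A (Python) =====
-- def get_empty_date_ranges(keys, vals):
--     retval = []
--
--     tmp = [-1, -1]
--     for i, (k, v) in enumerate(zip(keys, vals)):
--         if v is None and tmp[0] == -1:
--             tmp[0] = i
--
--         if v is not None and tmp[0] != -1:
--             tmp[1] = i-1
--             retval.append([keys[tmp[0]], keys[tmp[1]]])
--             tmp = [-1, -1]
--
--     if tmp[0] != -1:
--         tmp[1] = len(keys)-1
--         retval.append([keys[tmp[0]], keys[tmp[1]]])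
--
--     return retval
-- ===== SOURCE B (Python) =====
-- def get_empty_date_ranges(keys, vals):
--     # run-jump scan over precomputed None-flags; no sentinel tmp state machine, no flush block
--     flags = [v is None for _, v in zip(keys, vals)]
--     res = []
--     n = len(flags)
--     i = 0
--     while i < n:
--         if flags[i]:
--             j = i
--             while j + 1 < n and flags[j + 1]:
--                 j += 1
--             res.append([keys[i], keys[j]])
--             i = j + 1
--         else:
--             i += 1
--     return res
-- ===== Notes on version B (the rewrite author's own statement) =====
-- stated objective: simpler
-- what changed: B precomputes the None-flags of the zipped prefix once and emits each contiguous None-run by jumping from run start to run end, removing A's [-1,-1] sentinel state machine and its separate end-of-loop flush block.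
-- intended difference: When vals is shorter than keys, nonempty, and ends in None (and the boundary keys differ), A closes the trailing None-run with keys[len(keys)-1], a key beyond the iterated zip, while B closes it with the key at the last zipped index, which is the intended end of the run actually observed to be empty. — e.g. on get_empty_date_ranges(["a", "b"], [none]): A returns [["a", "b"]], B returns [["a", "a"]]
import Mathlib
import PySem

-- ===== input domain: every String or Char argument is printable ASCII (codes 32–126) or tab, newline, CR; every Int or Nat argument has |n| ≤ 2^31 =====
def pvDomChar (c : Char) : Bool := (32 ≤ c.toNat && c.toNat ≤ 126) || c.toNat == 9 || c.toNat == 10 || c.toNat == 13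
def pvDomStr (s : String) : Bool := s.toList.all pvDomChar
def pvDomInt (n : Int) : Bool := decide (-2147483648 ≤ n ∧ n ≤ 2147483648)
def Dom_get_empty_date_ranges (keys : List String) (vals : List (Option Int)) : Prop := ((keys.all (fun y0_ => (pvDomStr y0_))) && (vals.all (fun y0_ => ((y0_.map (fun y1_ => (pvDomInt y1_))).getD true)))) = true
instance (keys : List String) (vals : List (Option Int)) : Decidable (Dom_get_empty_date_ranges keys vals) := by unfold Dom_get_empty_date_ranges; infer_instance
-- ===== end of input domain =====

-- B replaces A's [-1, -1] sentinel state machine (and its separate end-of-loop flush block) by a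
-- run-jump scan over precomputed None-flags; A = B outside the trailing-run corner stated in D_ below.

-- ===== PORT A =====
-- keys[i] for an index the loop produced; the index is always in range in A, so the default is never used
def pvAGet (keys : List String) (i : Int) : String := (PySem.List.pyGet? keys i).getD ""

-- the for-loop over enumerate(zip(keys, vals)): i is the enumerate counter, (retval, t0, t1) the state
def pvALoop (keys : List String) (i : Int) (retval : List (List String)) (t0 t1 : Int) :
    List (String × Option Int) → List (List String) × Int × Int
  | [] => (retval, t0, t1)
  | (_, v) :: rest =>
    let t0' := if v = none ∧ t0 = -1 then i else t0
    if v ≠ none ∧ t0' ≠ -1 then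
      pvALoop keys (i + 1) (retval ++ [[pvAGet keys t0', pvAGet keys (i - 1)]]) (-1) (-1) rest
    else
      pvALoop keys (i + 1) retval t0' t1 rest

def get_empty_date_ranges (keys : List String) (vals : List (Option Int)) : List (List String) :=
  let res := pvALoop keys 0 [] (-1) (-1) (List.zip keys vals)
  if res.2.1 ≠ -1 then
    res.1 ++ [[pvAGet keys res.2.1, pvAGet keys ((keys.length : Int) - 1)]]
  else res.1

-- ===== PORT B =====
-- the inner while loop of Source B: length of the leading run of `true` flags
def pvRunLen : List Bool → Nat
  | [] => 0
  | b :: r => if b then pvRunLen r + 1 else 0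

-- the outer while loop of Source B; i is the position of the head of the remaining flags
-- (fuel = initial list length: only a totality guard for the run-jump recursion, it never runs out)
def pvBGo (keys : List String) : Nat → Nat → List Bool → List (List String)
  | 0, _, _ => []
  | _ + 1, _, [] => []
  | fuel + 1, i, b :: rest =>
    if b then
      [keys.getD i "", keys.getD (i + pvRunLen rest) ""] ::
        pvBGo keys fuel (i + pvRunLen rest + 1) (rest.drop (pvRunLen rest))
    else pvBGo keys fuel (i + 1) rest

def get_empty_date_ranges_alt (keys : List String) (vals : List (Option Int)) : List (List String) :=
  let flags := (List.zip keys vals).map (fun p => p.2.isNone)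
  pvBGo keys flags.length 0 flags

-- ===== PRECONDITION & SPEC =====
-- When vals is shorter than keys, nonempty, and ends in None (and the two boundary keys differ), A closes
-- the trailing None-run with keys[len(keys)-1] — a key beyond the iterated zip — while B closes it with
-- the key at the last zipped index, which is the intended end of the run actually observed to be empty.
def D_get_empty_date_ranges (keys : List String) (vals : List (Option Int)) : Prop :=
  vals ≠ [] ∧ vals.length < keys.length ∧ vals.getLast? = some none ∧
    keys.getD (vals.length - 1) "" ≠ keys.getD (keys.length - 1) ""
instance (keys : List String) (vals : List (Option Int)) : Decidable (D_get_empty_date_ranges keys vals) := by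
  unfold D_get_empty_date_ranges; infer_instance

def Spec_get_empty_date_ranges (keys : List String) (vals : List (Option Int)) (out : List (List String)) : Prop :=
  ¬ D_get_empty_date_ranges keys vals → out = get_empty_date_ranges_alt keys vals
instance (keys : List String) (vals : List (Option Int)) (out : List (List String)) : Decidable (Spec_get_empty_date_ranges keys vals out) := by
  unfold Spec_get_empty_date_ranges; infer_instance

def pvDiffWitness_get_empty_date_ranges : List String × List (Option Int) := (["a", "b"], [none])
def pvDiffWitnessOut_get_empty_date_ranges : (List (List String)) × (List (List String)) :=
  ([["a", "b"]], [["a", "a"]])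

-- ===== CLAIM (what is proved, stated in full; the proofs are below) =====
def Claim_unchanged_get_empty_date_ranges : Prop := ∀ (keys : List String) (vals : List (Option Int)), Dom_get_empty_date_ranges keys vals → Spec_get_empty_date_ranges keys vals (get_empty_date_ranges keys vals)
def Claim_changed_get_empty_date_ranges : Prop := Dom_get_empty_date_ranges (pvDiffWitness_get_empty_date_ranges.1) (pvDiffWitness_get_empty_date_ranges.2) ∧ D_get_empty_date_ranges (pvDiffWitness_get_empty_date_ranges.1) (pvDiffWitness_get_empty_date_ranges.2) ∧ get_empty_date_ranges (pvDiffWitness_get_empty_date_ranges.1) (pvDiffWitness_get_empty_date_ranges.2) = pvDiffWitnessOut_get_empty_date_ranges.1 ∧ get_empty_date_ranges_alt (pvDiffWitness_get_empty_date_ranges.1) (pvDiffWitness_get_empty_date_ranges.2) = pvDiffWitnessOut_get_empty_date_ranges.2 ∧ pvDiffWitnessOut_get_empty_date_ranges.1 ≠ pvDiffWitnessOut_get_empty_date_ranges.2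
def Claim_exact_get_empty_date_ranges : Prop := ∀ (keys : List String) (vals : List (Option Int)), Dom_get_empty_date_ranges keys vals → D_get_empty_date_ranges keys vals → get_empty_date_ranges keys vals ≠ get_empty_date_ranges_alt keys vals

-- ===== LEMMAS AND PROOFS =====

theorem pvRunLen_le (fl : List Bool) : pvRunLen fl ≤ fl.length := by
  induction fl with
  | nil => simp [pvRunLen]
  | cons b r ih => cases b <;> simp [pvRunLen] <;> omega

theorem pvRunLen_drop (fl : List Bool) (h : pvRunLen fl < fl.length) :
    fl.drop (pvRunLen fl) = false :: fl.drop (pvRunLen fl + 1) := by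
  induction fl with
  | nil => simp at h
  | cons b r ih =>
    cases b
    · simp [pvRunLen]
    · simp only [pvRunLen] at h ⊢
      simpa using ih (by simpa using h)

theorem pvRunLen_full (fl : List Bool) (hne : fl ≠ []) (h : pvRunLen fl = fl.length) :
    fl.getLast? = some true := by
  induction fl with
  | nil => simp at hne
  | cons b r ih =>
    cases b
    · simp [pvRunLen] at h
    · simp only [pvRunLen, List.length_cons] at h
      cases r with
      | nil => simp
      | cons c s =>
        rw [List.getLast?_cons_cons]
        exact ih (by simp) (by simpa using h)

theorem getLast?_cons_of_ne_nil {α : Type} (a : α) (l : List α) (h : l ≠ []) :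
    (a :: l).getLast? = l.getLast? := by
  cases l with
  | nil => simp at h
  | cons b t => rw [List.getLast?_cons_cons]

theorem getLast?_drop_of_ne_nil {α : Type} (l : List α) (k : Nat) (h : l.drop k ≠ []) :
    (l.drop k).getLast? = l.getLast? := by
  induction l generalizing k with
  | nil => simp at h
  | cons a t ih =>
    cases k with
    | zero => rfl
    | succ k' =>
      rw [List.drop_succ_cons] at h ⊢
      rw [ih k' h, getLast?_cons_of_ne_nil]
      intro hn; rw [hn] at h; simp at h

-- element-at-a-time characterization of A's loop + flush: st = the run start (none = tmp[0] == -1)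
def pvGoA (keys : List String) (i : Nat) (st : Option Nat) : List Bool → List (List String)
  | [] =>
    match st with
    | none => []
    | some s => [[keys.getD s "", keys.getD (keys.length - 1) ""]]
  | b :: rest =>
    match st, b with
    | none, true => pvGoA keys (i + 1) (some i) rest
    | none, false => pvGoA keys (i + 1) none rest
    | some s, true => pvGoA keys (i + 1) (some s) rest
    | some s, false => [keys.getD s "", keys.getD (i - 1) ""] :: pvGoA keys (i + 1) none rest

theorem pvMidL (keys : List String) :
    ∀ (fl : List Bool) (j s : Nat), 1 ≤ j →
      pvGoA keys j (some s) fl =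
        if pvRunLen fl = fl.length then [[keys.getD s "", keys.getD (keys.length - 1) ""]]
        else [keys.getD s "", keys.getD (j + pvRunLen fl - 1) ""] ::
          pvGoA keys (j + pvRunLen fl + 1) none (fl.drop (pvRunLen fl + 1)) := by
  intro fl
  induction fl with
  | nil => intro j s hj; simp [pvGoA, pvRunLen]
  | cons b rest ih =>
    intro j s hj
    cases b
    · have hne : pvRunLen (false :: rest) ≠ (false :: rest).length := by
        simp [pvRunLen]
      rw [if_neg hne]
      show [keys.getD s "", keys.getD (j - 1) ""] :: pvGoA keys (j + 1) none rest = _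
      simp [pvRunLen]
    · have h1 : pvRunLen (true :: rest) = pvRunLen rest + 1 := by simp [pvRunLen]
      have hgo : pvGoA keys j (some s) (true :: rest) = pvGoA keys (j+1) (some s) rest := rfl
      rw [hgo, ih (j+1) s (by omega), h1]
      by_cases h : pvRunLen rest = rest.length
      · rw [if_pos h, if_pos (by simp [h])]
      · rw [if_neg h, if_neg (by simp [h])]
        have e1 : j + 1 + pvRunLen rest - 1 = j + (pvRunLen rest + 1) - 1 := by omega
        have e2 : j + 1 + pvRunLen rest + 1 = j + (pvRunLen rest + 1) + 1 := by omega
        have e3 : rest.drop (pvRunLen rest + 1) = (true :: rest).drop (pvRunLen rest + 1 + 1) := by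
          simp [List.drop_succ_cons]
        rw [e1, e2, e3]

-- the trailing-run side condition: where A's flush index keys.length-1 names the same key as the run end
def pvCond (keys : List String) (i : Nat) (fl : List Bool) : Prop :=
  fl.getLast? = some true → keys.getD (keys.length - 1) "" = keys.getD (i + fl.length - 1) ""

theorem pvBGo_nil (keys : List String) (f i : Nat) : pvBGo keys f i [] = [] := by
  cases f <;> rfl

theorem pvMainL (keys : List String) :
    ∀ (N : Nat) (fl : List Bool), fl.length ≤ N → ∀ (i fuel : Nat), fl.length ≤ fuel →
      pvCond keys i fl → pvGoA keys i none fl = pvBGo keys fuel i fl := by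
  intro N
  induction N with
  | zero =>
    intro fl hN i fuel _ _
    have : fl = [] := by cases fl <;> simp_all
    subst this; simp [pvGoA, pvBGo_nil]
  | succ N ih =>
    intro fl hN i fuel hf hc
    cases fl with
    | nil => simp [pvGoA, pvBGo_nil]
    | cons b rest =>
      have hN' : rest.length ≤ N := by simp at hN; omega
      obtain ⟨g, rfl⟩ : ∃ g, fuel = g + 1 := by
        cases fuel
        · simp at hf
        · exact ⟨_, rfl⟩
      have hg : rest.length ≤ g := by simp at hf; omega
      cases b
      · -- flags[i] false: skip
        have hgo : pvGoA keys i none (false :: rest) = pvGoA keys (i+1) none rest := rfl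
        have hb : pvBGo keys (g+1) i (false :: rest) = pvBGo keys g (i+1) rest := by
          simp [pvBGo]
        rw [hgo, hb]
        apply ih rest hN' (i+1) g hg
        intro hl
        have hne : rest ≠ [] := by intro h; rw [h] at hl; simp at hl
        have h0 : rest.length ≠ 0 := by simpa using hne
        have := hc (by rw [getLast?_cons_of_ne_nil false rest hne]; exact hl)
        rw [this]
        have e : i + (false :: rest).length - 1 = i + 1 + rest.length - 1 := by
          simp only [List.length_cons]; omega
        rw [e]
      · -- flags[i] true: a None-run starts
        have hgo : pvGoA keys i none (true :: rest) = pvGoA keys (i+1) (some i) rest := rfl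
        rw [hgo, pvMidL keys rest (i+1) i (by omega)]
        have hb : pvBGo keys (g+1) i (true :: rest) =
            [keys.getD i "", keys.getD (i + pvRunLen rest) ""] ::
              pvBGo keys g (i + pvRunLen rest + 1) (rest.drop (pvRunLen rest)) := by
          simp [pvBGo]
        rw [hb]
        by_cases h : pvRunLen rest = rest.length
        · rw [if_pos h]
          have hdrop : rest.drop (pvRunLen rest) = [] := by rw [h]; simp
          rw [hdrop, pvBGo_nil]
          have hlast : (true :: rest).getLast? = some true :=
            pvRunLen_full (true :: rest) (by simp) (by simp [pvRunLen, h])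
          have hcc := hc hlast
          have e : i + (true :: rest).length - 1 = i + pvRunLen rest := by simp [h]
          rw [hcc, e]
        · rw [if_neg h]
          have hlt : pvRunLen rest < rest.length := lt_of_le_of_ne (pvRunLen_le rest) h
          rw [pvRunLen_drop rest hlt]
          obtain ⟨g', rfl⟩ : ∃ g', g = g' + 1 := by
            cases g
            · exfalso; omega
            · exact ⟨_, rfl⟩
          have hb2 : pvBGo keys (g'+1) (i + pvRunLen rest + 1) (false :: rest.drop (pvRunLen rest + 1)) =
              pvBGo keys g' (i + pvRunLen rest + 2) (rest.drop (pvRunLen rest + 1)) := by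
            simp [pvBGo]
          rw [hb2]
          have e0 : i + 1 + pvRunLen rest - 1 = i + pvRunLen rest := by omega
          have e1 : i + 1 + pvRunLen rest + 1 = i + pvRunLen rest + 2 := by omega
          rw [e0, e1]
          have hdlen : (rest.drop (pvRunLen rest + 1)).length = rest.length - (pvRunLen rest + 1) :=
            List.length_drop
          congr 1
          apply ih _ (by rw [hdlen]; omega) _ _ (by rw [hdlen]; omega)
          intro hl
          have hdne : rest.drop (pvRunLen rest + 1) ≠ [] := by
            intro hh; rw [hh] at hl; simp at hl
          have h1 : rest.getLast? = some true := by
            rw [← getLast?_drop_of_ne_nil rest (pvRunLen rest + 1) hdne]; exact hl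
          have hne : rest ≠ [] := by intro hh; subst hh; simp at hlt
          have hcc := hc (by rw [getLast?_cons_of_ne_nil true rest hne]; exact h1)
          rw [hcc]
          have e2 : i + (true :: rest).length - 1 =
              i + pvRunLen rest + 2 + (rest.drop (pvRunLen rest + 1)).length - 1 := by
            rw [hdlen]; simp; omega
          rw [e2]

def pvEnc : Option Nat → Int
  | none => -1
  | some s => (s : Int)

def pvFinish (keys : List String) (r : List (List String) × Int × Int) : List (List String) :=
  if r.2.1 ≠ -1 then r.1 ++ [[pvAGet keys r.2.1, pvAGet keys ((keys.length : Int) - 1)]] else r.1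

theorem pvAGet_nat (keys : List String) (s : Nat) : pvAGet keys (s : Int) = keys.getD s "" := by
  simp [pvAGet, PySem.List.pyGet?_natCast, List.getD_eq_getElem?_getD]

theorem pvAGet_last (keys : List String) :
    pvAGet keys ((keys.length : Int) - 1) = keys.getD (keys.length - 1) "" := by
  cases keys with
  | nil => rfl
  | cons a t =>
    have e : (((a :: t).length : Int)) - 1 = (((a :: t).length - 1 : Nat) : Int) := by
      simp
    rw [e, pvAGet_nat]

theorem pvA_char (keys : List String) :
    ∀ (zs : List (String × Option Int)) (i : Nat) (ret : List (List String)) (st : Option Nat) (t1 : Int),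
      (∀ s, st = some s → s < i) →
      pvFinish keys (pvALoop keys (i : Int) ret (pvEnc st) t1 zs) =
        ret ++ pvGoA keys i st (zs.map (fun p => p.2.isNone)) := by
  intro zs
  induction zs with
  | nil =>
    intro i ret st t1 h
    cases st with
    | none => simp [pvALoop, pvFinish, pvEnc, pvGoA]
    | some s =>
      have hsne : ((s : Int)) ≠ -1 := by omega
      simp only [pvALoop, pvFinish, pvEnc, List.map_nil, pvGoA]
      rw [if_pos (by exact hsne)]
      rw [pvAGet_nat, pvAGet_last]
  | cons p rest ih =>
    obtain ⟨k, v⟩ := p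
    intro i ret st t1 h
    have cast1 : ((i : Int)) + 1 = (((i + 1 : Nat)) : Int) := by push_cast; ring
    cases st with
    | none =>
      cases v with
      | none =>
        have step : pvALoop keys (i : Int) ret (pvEnc none) t1 ((k, none) :: rest) =
            pvALoop keys ((i : Int) + 1) ret (i : Int) t1 rest := by
          simp [pvALoop, pvEnc]
        rw [step, cast1]
        have := ih (i + 1) ret (some i) t1 (by intro s hs; cases hs; omega)
        simpa [pvGoA, pvEnc] using this
      | some x =>
        have step : pvALoop keys (i : Int) ret (pvEnc none) t1 ((k, some x) :: rest) =
            pvALoop keys ((i : Int) + 1) ret (-1) t1 rest := by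
          simp [pvALoop, pvEnc]
        rw [step, cast1]
        have := ih (i + 1) ret none t1 (by intro s hs; cases hs)
        simpa [pvGoA, pvEnc] using this
    | some s =>
      have hsi : s < i := h s rfl
      have hsne : ((s : Int)) ≠ -1 := by omega
      cases v with
      | none =>
        have step : pvALoop keys (i : Int) ret (pvEnc (some s)) t1 ((k, none) :: rest) =
            pvALoop keys ((i : Int) + 1) ret ((s : Int)) t1 rest := by
          simp [pvALoop, pvEnc, hsne]
        rw [step, cast1]
        have := ih (i + 1) ret (some s) t1 (by intro s' hs'; cases hs'; omega)
        simpa [pvGoA, pvEnc] using this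
      | some x =>
        have step : pvALoop keys (i : Int) ret (pvEnc (some s)) t1 ((k, some x) :: rest) =
            pvALoop keys ((i : Int) + 1)
              (ret ++ [[pvAGet keys ((s : Int)), pvAGet keys ((i : Int) - 1)]]) (-1) (-1) rest := by
          simp [pvALoop, pvEnc, hsne]
        rw [step, cast1]
        have := ih (i + 1) (ret ++ [[pvAGet keys ((s : Int)), pvAGet keys ((i : Int) - 1)]]) none (-1)
          (by intro s' hs'; cases hs')
        have casti : ((i : Int)) - 1 = (((i - 1 : Nat)) : Int) := by omega
        rw [pvAGet_nat, casti, pvAGet_nat]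
        simp only [pvEnc] at this
        rw [casti, pvAGet_nat, pvAGet_nat] at this
        rw [this]
        simp [pvGoA]

theorem pvCond_of_not_D (keys : List String) (vals : List (Option Int))
    (hnd : ¬ D_get_empty_date_ranges keys vals) :
    pvCond keys 0 ((List.zip keys vals).map (fun p => p.2.isNone)) := by
  intro hl
  set flags := (List.zip keys vals).map (fun p => p.2.isNone) with hfl
  have hn : flags.length = min keys.length vals.length := by
    simp [hfl]
  have hfne : flags ≠ [] := by intro h; rw [h] at hl; simp at hl
  have hpos : 0 < flags.length := List.length_pos_of_ne_nil hfne
  rw [Nat.zero_add]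
  by_cases hKV : keys.length ≤ vals.length
  · have : flags.length = keys.length := by omega
    rw [this]
  · have hVK : vals.length < keys.length := by omega
    have hlen : flags.length = vals.length := by omega
    have hv1 : vals ≠ [] := by
      intro h; subst h; rw [List.length_nil] at hlen; omega
    have hb : flags.length - 1 < flags.length := by omega
    have hgl : flags.getLast? = some flags[flags.length - 1] := by
      rw [List.getLast?_eq_getElem?, List.getElem?_eq_getElem hb]
    have hzb : flags.length - 1 < (List.zip keys vals).length := by
      simp [List.length_zip]; omega
    have hflE : flags[flags.length - 1] = (vals[flags.length - 1]'(by omega)).isNone := by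
      simp [hfl]
    have hlast : (vals[flags.length - 1]'(by omega)) = none := by
      rw [hgl, hflE] at hl
      simpa using hl
    have hlastq : vals[flags.length - 1]? = some none := by
      rw [List.getElem?_eq_getElem (by omega : flags.length - 1 < vals.length)]
      exact congrArg some hlast
    have hvl : vals.getLast? = some none := by
      rw [List.getLast?_eq_getElem?, show vals.length - 1 = flags.length - 1 by omega, hlastq]
    have heq : keys.getD (vals.length - 1) "" = keys.getD (keys.length - 1) "" := by
      by_contra hne
      exact hnd ⟨hv1, hVK, hvl, hne⟩
    rw [hlen, ← heq]

theorem lastA (keys : List String) :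
    ∀ (fl : List Bool) (i : Nat) (st : Option Nat),
      (fl.getLast? = some true ∨ (fl = [] ∧ st ≠ none)) →
      ∃ x, (pvGoA keys i st fl).getLast? = some [x, keys.getD (keys.length - 1) ""] := by
  intro fl
  induction fl with
  | nil =>
    intro i st h
    cases st with
    | none => rcases h with h | ⟨_, h⟩ <;> simp_all
    | some s => exact ⟨keys.getD s "", rfl⟩
  | cons b rest ih =>
    intro i st h
    have hl : (b :: rest).getLast? = some true := by
      rcases h with h | ⟨h, _⟩
      · exact h
      · simp at h
    cases b
    · have hne : rest ≠ [] := by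
        intro hh; subst hh; simp at hl
      have hl' : rest.getLast? = some true := by
        rwa [getLast?_cons_of_ne_nil false rest hne] at hl
      cases st with
      | none => exact ih (i+1) none (Or.inl hl')
      | some s =>
        obtain ⟨x, hx⟩ := ih (i+1) none (Or.inl hl')
        have htne : pvGoA keys (i+1) none rest ≠ [] := by
          intro hh; rw [hh] at hx; simp at hx
        refine ⟨x, ?_⟩
        show ([keys.getD s "", keys.getD (i - 1) ""] :: pvGoA keys (i+1) none rest).getLast? = _
        rw [getLast?_cons_of_ne_nil _ _ htne]
        exact hx
    · cases rest with
      | nil =>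
        cases st with
        | none => exact ih (i+1) (some i) (Or.inr ⟨rfl, by simp⟩)
        | some s => exact ih (i+1) (some s) (Or.inr ⟨rfl, by simp⟩)
      | cons c t =>
        have hl' : (c :: t).getLast? = some true := by
          rwa [List.getLast?_cons_cons] at hl
        cases st with
        | none => exact ih (i+1) (some i) (Or.inl hl')
        | some s => exact ih (i+1) (some s) (Or.inl hl')

theorem lastB (keys : List String) :
    ∀ (N : Nat) (fl : List Bool), fl.length ≤ N → ∀ (i fuel : Nat), fl.length ≤ fuel →
      fl.getLast? = some true →
      ∃ x, (pvBGo keys fuel i fl).getLast? = some [x, keys.getD (i + fl.length - 1) ""] := by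
  intro N
  induction N with
  | zero =>
    intro fl hN i fuel _ hl
    have : fl = [] := by cases fl <;> simp_all
    subst this; simp at hl
  | succ N ih =>
    intro fl hN i fuel hf hl
    cases fl with
    | nil => simp at hl
    | cons b rest =>
      have hN' : rest.length ≤ N := by simp at hN; omega
      obtain ⟨g, rfl⟩ : ∃ g, fuel = g + 1 := by
        cases fuel
        · simp at hf
        · exact ⟨_, rfl⟩
      have hg : rest.length ≤ g := by simp at hf; omega
      cases b
      · have hne : rest ≠ [] := by intro hh; subst hh; simp at hl
        have hl' : rest.getLast? = some true := by
          rwa [getLast?_cons_of_ne_nil false rest hne] at hl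
        have hb : pvBGo keys (g+1) i (false :: rest) = pvBGo keys g (i+1) rest := by
          simp [pvBGo]
        rw [hb]
        obtain ⟨x, hx⟩ := ih rest hN' (i+1) g hg hl'
        refine ⟨x, ?_⟩
        rw [hx]
        have e : i + 1 + rest.length - 1 = i + (false :: rest).length - 1 := by
          simp only [List.length_cons]; omega
        rw [e]
      · have hb : pvBGo keys (g+1) i (true :: rest) =
            [keys.getD i "", keys.getD (i + pvRunLen rest) ""] ::
              pvBGo keys g (i + pvRunLen rest + 1) (rest.drop (pvRunLen rest)) := by
          simp [pvBGo]
        rw [hb]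
        by_cases h : pvRunLen rest = rest.length
        · have hdrop : rest.drop (pvRunLen rest) = [] := by rw [h]; simp
          rw [hdrop, pvBGo_nil]
          refine ⟨keys.getD i "", ?_⟩
          simp only [List.getLast?_singleton]
          congr 3
          simp [h]
        · have hlt : pvRunLen rest < rest.length := lt_of_le_of_ne (pvRunLen_le rest) h
          have hdne : rest.drop (pvRunLen rest) ≠ [] := by
            intro hh
            have := List.length_drop (l := rest) (i := pvRunLen rest)
            rw [hh] at this; simp at this; omega
          have hrne : rest ≠ [] := by intro hh; subst hh; simp at hlt
          have hl' : (rest.drop (pvRunLen rest)).getLast? = some true := by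
            rw [getLast?_drop_of_ne_nil rest (pvRunLen rest) hdne]
            rwa [getLast?_cons_of_ne_nil true rest hrne] at hl
          have hdl : (rest.drop (pvRunLen rest)).length = rest.length - pvRunLen rest :=
            List.length_drop
          obtain ⟨x, hx⟩ := ih (rest.drop (pvRunLen rest)) (by rw [hdl]; omega)
            (i + pvRunLen rest + 1) g (by rw [hdl]; omega) hl'
          have htne : pvBGo keys g (i + pvRunLen rest + 1) (rest.drop (pvRunLen rest)) ≠ [] := by
            intro hh; rw [hh] at hx; simp at hx
          refine ⟨x, ?_⟩
          rw [getLast?_cons_of_ne_nil _ _ htne, hx]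
          have e : i + pvRunLen rest + 1 + (rest.drop (pvRunLen rest)).length - 1 =
              i + (true :: rest).length - 1 := by
            rw [hdl]; simp only [List.length_cons]; omega
          rw [e]

theorem pvTight (keys : List String) (vals : List (Option Int))
    (hd : D_get_empty_date_ranges keys vals) :
    get_empty_date_ranges keys vals ≠ get_empty_date_ranges_alt keys vals := by
  obtain ⟨hv1, hVK, hvl, hne⟩ := hd
  set flags := (List.zip keys vals).map (fun p => p.2.isNone) with hfl
  have hvpos : 0 < vals.length := List.length_pos_of_ne_nil hv1
  have hn : flags.length = vals.length := by
    simp [hfl]; omega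
  have hlast : flags.getLast? = some true := by
    have hb : flags.length - 1 < flags.length := by omega
    rw [List.getLast?_eq_getElem?, List.getElem?_eq_getElem hb]
    have hvnone : (vals[flags.length - 1]'(by omega)) = none := by
      have := hvl
      rw [List.getLast?_eq_getElem?, List.getElem?_eq_getElem (by omega : vals.length - 1 < vals.length)] at this
      have h2 : vals.length - 1 = flags.length - 1 := by omega
      simp only [← h2]
      exact Option.some_injective _ this
    have : flags[flags.length - 1] = (vals[flags.length - 1]'(by omega)).isNone := by
      simp [hfl]
    rw [this, hvnone]
    rfl
  have hA : get_empty_date_ranges keys vals = pvGoA keys 0 none flags := by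
    have := pvA_char keys (List.zip keys vals) 0 [] none (-1) (by intro s hs; cases hs)
    simpa [pvEnc, pvFinish, get_empty_date_ranges] using this
  obtain ⟨x, hx⟩ := lastA keys flags 0 none (Or.inl hlast)
  obtain ⟨y, hy⟩ := lastB keys flags.length flags le_rfl 0 flags.length le_rfl hlast
  intro hEq
  rw [hA] at hEq
  have : get_empty_date_ranges_alt keys vals = pvBGo keys flags.length 0 flags := rfl
  rw [this] at hEq
  rw [hEq, hy] at hx
  have hxy : [y, keys.getD (0 + flags.length - 1) ""] = [x, keys.getD (keys.length - 1) ""] :=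
    Option.some_injective _ hx
  simp only [List.cons.injEq, and_true] at hxy
  have h2 : keys.getD (0 + flags.length - 1) "" = keys.getD (keys.length - 1) "" := hxy.2
  rw [show (0 : Nat) + flags.length - 1 = vals.length - 1 by omega] at h2
  exact hne h2

-- ===== VERDICT (by name: the statement is the Claim_ definition above) =====
theorem get_empty_date_ranges_spec : Claim_unchanged_get_empty_date_ranges := by
  intro keys vals _hdom hnd
  have hA : get_empty_date_ranges keys vals =
      pvGoA keys 0 none ((List.zip keys vals).map (fun p => p.2.isNone)) := by
    have := pvA_char keys (List.zip keys vals) 0 [] none (-1) (by intro s hs; cases hs)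
    simpa [pvEnc, pvFinish, get_empty_date_ranges] using this
  rw [hA]
  exact pvMainL keys _ _ le_rfl 0 _ le_rfl (pvCond_of_not_D keys vals hnd)

theorem get_empty_date_ranges_changed : Claim_changed_get_empty_date_ranges := by
  unfold Claim_changed_get_empty_date_ranges; decide

theorem get_empty_date_ranges_tight : Claim_exact_get_empty_date_ranges := by
  intro keys vals _hdom hd
  exact pvTight keys vals hd
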